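-- pv_equiv track=rewrite | github.com/bashrc2/epicyon | tests.py | getFunctionCalls
-- ===== SOURCE A (Python) =====
-- def getFunctionCalls(name: str, lines: [], startLineCtr: int,
--                      functionProperties: {}) -> []:
--     """Returns the functions called by the given one,
--     Starting with the given source code at the given line
--     """
--     callsFunctions = []
--     functionContentStr = ''
--     for lineCtr in range(startLineCtr + 1, len(lines)):
--         lineStr = lines[lineCtr].strip()
--         if lineStr.startswith('def '):
--             break
--         if lineStr.startswith('class '):
--             break
--         functionContentStr += lines[lineCtr]
--     for funcName, properties in functionProperties.items():
--         if funcName + '(' in functionContentStr: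
--             callsFunctions.append(funcName)
--     return callsFunctions
-- ===== SOURCE B (Python) =====
-- def getFunctionCalls(name: str, lines: [], startLineCtr: int,
--                      functionProperties: {}) -> []:
--     """Single left-to-right scan of the function body: at every '(' look the
--     preceding characters up in a set of known function names, instead of one
--     substring search over the body per known function."""
--     body = []
--     for lineCtr in range(startLineCtr + 1, len(lines)):
--         lineStr = lines[lineCtr].strip()
--         if lineStr.startswith('def ') or lineStr.startswith('class '):
--             break
--         body.append(lines[lineCtr])
--     content = ''.join(body)
--     patterns = set(functionProperties)
--     lengths = sorted({len(f) for f in functionProperties})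
--     found = set()
--     for i, ch in enumerate(content):
--         if ch == '(':
--             for length in lengths:
--                 if length <= i:
--                     cand = content[i - length:i]
--                     if cand in patterns:
--                         found.add(cand)
--     return [f for f in functionProperties if f in found]
-- ===== Notes on version B (the rewrite author's own statement) =====
-- stated objective: faster
-- what changed: Instead of scanning the body once per known function with a substring search, B makes a single left-to-right scan of the body: at each '(' it slices out the candidate name for each occurring name length and looks it up in a set of known function names, then emits matches in dict order.
import Mathlib
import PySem

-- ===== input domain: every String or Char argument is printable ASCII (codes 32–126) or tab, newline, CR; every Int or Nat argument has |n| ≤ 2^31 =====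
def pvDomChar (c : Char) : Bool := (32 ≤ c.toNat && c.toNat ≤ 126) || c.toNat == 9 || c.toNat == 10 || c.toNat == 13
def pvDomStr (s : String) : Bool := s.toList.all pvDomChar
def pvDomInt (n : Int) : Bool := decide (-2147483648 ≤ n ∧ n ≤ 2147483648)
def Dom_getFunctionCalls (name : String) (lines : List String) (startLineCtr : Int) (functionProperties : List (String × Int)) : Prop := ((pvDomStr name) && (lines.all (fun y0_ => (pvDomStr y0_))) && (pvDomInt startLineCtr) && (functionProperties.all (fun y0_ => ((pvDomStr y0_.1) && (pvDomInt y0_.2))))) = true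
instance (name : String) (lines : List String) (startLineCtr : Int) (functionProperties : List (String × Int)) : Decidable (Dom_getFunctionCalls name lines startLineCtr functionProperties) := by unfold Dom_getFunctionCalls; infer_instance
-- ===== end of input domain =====

-- B replaces the per-function substring scans of the body with one left-to-right scan
-- of the body that looks up the characters before each '(' in a set of known names
-- (objective: alternative single-pass algorithm, same results in the same order).

-- ===== PORT A =====
-- the body-collecting loop of A: ascending indices, Python indexing, break on def/class, string +=
def pvBodyA (lines : List String) : List Int → List Char → List Char
  | [], acc => acc
  | i :: rest, acc =>
    match PySem.List.pyGet? lines i with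
    | none => acc   -- Python raises IndexError here; excluded by Pre_
    | some line =>
      let s := PySem.Chars.strip line.toList
      if PySem.Chars.startswith s ['d','e','f',' '] then acc
      else if PySem.Chars.startswith s ['c','l','a','s','s',' '] then acc
      else pvBodyA lines rest (acc ++ line.toList)

def getFunctionCalls (name : String) (lines : List String) (startLineCtr : Int) (functionProperties : List (String × Int)) : List String :=
  let content := pvBodyA lines (PySem.List.pyRange (startLineCtr + 1) (lines.length : Int) 1) []
  functionProperties.foldl
    (fun acc p => if PySem.Chars.isIn (p.1.toList ++ ['(']) content then acc ++ [p.1] else acc) []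

-- ===== PORT B =====
-- B's body loop collects the lines as a list (joined afterwards)
def pvBodyB (lines : List String) : List Int → List (List Char)
  | [] => []
  | i :: rest =>
    match PySem.List.pyGet? lines i with
    | none => []   -- Python raises IndexError here; excluded by Pre_
    | some line =>
      let s := PySem.Chars.strip line.toList
      if PySem.Chars.startswith s ['d','e','f',' '] || PySem.Chars.startswith s ['c','l','a','s','s',' '] then []
      else line.toList :: pvBodyB lines rest

-- B's single scan: for each (i, ch) with ch = '(', try every pattern length
def pvScanB (content : List Char) (lengths : List Nat) (patterns : PySem.Set (List Char)) : PySem.Set (List Char) :=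
  (PySem.List.enumerate content 0).foldl
    (fun found e =>
      if e.2 == '(' then
        lengths.foldl
          (fun found (L : Nat) =>
            if (L : Int) ≤ e.1 then
              let cand := PySem.List.slice content (some (e.1 - (L : Int))) (some e.1)
              if PySem.Set.contains patterns cand then PySem.Set.add found cand else found
            else found) found
      else found) PySem.Set.empty

def getFunctionCalls_alt (name : String) (lines : List String) (startLineCtr : Int) (functionProperties : List (String × Int)) : List String :=
  let content := PySem.Chars.join [] (pvBodyB lines (PySem.List.pyRange (startLineCtr + 1) (lines.length : Int) 1))
  let patterns : PySem.Set (List Char) := PySem.Set.ofList (functionProperties.map (fun p => p.1.toList))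
  let lengths := PySem.List.sorted (PySem.Set.ofList (functionProperties.map (fun p => p.1.toList.length))) (fun x => x) false
  let found := pvScanB content lengths patterns
  (functionProperties.filter (fun p => PySem.Set.contains found p.1.toList)).map (fun p => p.1)

-- ===== PRECONDITION & SPEC =====
-- Pre_ excludes exactly the inputs where A raises IndexError: a nonempty range whose
-- first index startLineCtr+1 is below -len(lines).
def Pre_getFunctionCalls (name : String) (lines : List String) (startLineCtr : Int) (functionProperties : List (String × Int)) : Prop :=
  (-(lines.length : Int) ≤ startLineCtr + 1) ∨ ((lines.length : Int) ≤ startLineCtr + 1)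
instance (name : String) (lines : List String) (startLineCtr : Int) (functionProperties : List (String × Int)) : Decidable (Pre_getFunctionCalls name lines startLineCtr functionProperties) := by unfold Pre_getFunctionCalls; infer_instance

def pvWitness_getFunctionCalls : String × List String × Int × (List (String × Int)) :=
  ("foo", ["    bar(1)", "def baz:"], -1, [("bar", 3), ("baz", 7)])

def Spec_getFunctionCalls (name : String) (lines : List String) (startLineCtr : Int) (functionProperties : List (String × Int)) (out : List String) : Prop := out = getFunctionCalls_alt name lines startLineCtr functionProperties
instance (name : String) (lines : List String) (startLineCtr : Int) (functionProperties : List (String × Int)) (out : List String) : Decidable (Spec_getFunctionCalls name lines startLineCtr functionProperties out) := by unfold Spec_getFunctionCalls; infer_instance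

-- ===== CLAIM (what is proved, stated in full; the proofs are below) =====
def Claim_equal_getFunctionCalls : Prop := ∀ (name : String) (lines : List String) (startLineCtr : Int) (functionProperties : List (String × Int)), Dom_getFunctionCalls name lines startLineCtr functionProperties → Pre_getFunctionCalls name lines startLineCtr functionProperties → Spec_getFunctionCalls name lines startLineCtr functionProperties (getFunctionCalls name lines startLineCtr functionProperties)

-- ===== LEMMAS AND PROOFS =====

-- join with empty separator is concatenation, one step
lemma pv_join_nil_cons (x : List Char) (xs : List (List Char)) :
    PySem.Chars.join [] (x :: xs) = x ++ PySem.Chars.join [] xs := by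
  cases xs with
  | nil => simp [PySem.Chars.join, List.intercalate]
  | cons y t => simp [PySem.Chars.join_cons_cons]

-- A's accumulating body loop equals B's collect-then-join loop
lemma pv_bodyA_eq_bodyB (lines : List String) (idxs : List Int) (acc : List Char) :
    pvBodyA lines idxs acc = acc ++ PySem.Chars.join [] (pvBodyB lines idxs) := by
  induction idxs generalizing acc with
  | nil => simp [pvBodyA, pvBodyB, PySem.Chars.join, List.intercalate]
  | cons i rest ih =>
    simp only [pvBodyA, pvBodyB]
    cases PySem.List.pyGet? lines i with
    | none => simp [PySem.Chars.join, List.intercalate]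
    | some line =>
      by_cases hd : PySem.Chars.startswith (PySem.Chars.strip line.toList) ['d','e','f',' '] = true
      · simp [hd, PySem.Chars.join, List.intercalate]
      · by_cases hc : PySem.Chars.startswith (PySem.Chars.strip line.toList) ['c','l','a','s','s',' '] = true
        · simp [hd, hc, PySem.Chars.join, List.intercalate]
        · simp [hd, hc, ih, pv_join_nil_cons]

-- membership through a fold whose step either keeps the set or adds one element
lemma pv_mem_foldl {κ : Type} (w : List Char)
    (f : PySem.Set (List Char) → κ → PySem.Set (List Char)) (Q : κ → Prop)
    (h : ∀ fs L, (w ∈ f fs L ↔ w ∈ fs ∨ Q L)) :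
    ∀ (l : List κ) (fs0 : PySem.Set (List Char)),
      w ∈ l.foldl f fs0 ↔ w ∈ fs0 ∨ ∃ L ∈ l, Q L := by
  intro l
  induction l with
  | nil => simp
  | cons x t ih =>
    intro fs0
    rw [List.foldl_cons, ih, h]
    simp only [List.mem_cons]
    constructor
    · rintro ((h1 | h2) | ⟨L, hL, hQ⟩)
      · exact Or.inl h1
      · exact Or.inr ⟨x, Or.inl rfl, h2⟩
      · exact Or.inr ⟨L, Or.inr hL, hQ⟩
    · rintro (h1 | ⟨L, (rfl | hL), hQ⟩)
      · exact Or.inl (Or.inl h1)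
      · exact Or.inl (Or.inr hQ)
      · exact Or.inr ⟨L, hL, hQ⟩

-- one step of the inner fold adds the candidate exactly under its conditions
lemma pv_inner_step (content : List Char) (patterns : PySem.Set (List Char))
    (e : Int × Char) (w : List Char) (fs' : PySem.Set (List Char)) (L : Nat) :
    (w ∈ if (L : Int) ≤ e.1 then
            (if PySem.Set.contains patterns (PySem.List.slice content (some (e.1 - (L : Int))) (some e.1)) then
              PySem.Set.add fs' (PySem.List.slice content (some (e.1 - (L : Int))) (some e.1))
            else fs')
          else fs') ↔
      w ∈ fs' ∨ ((L : Int) ≤ e.1 ∧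
        PySem.List.slice content (some (e.1 - (L : Int))) (some e.1) ∈ patterns ∧
        PySem.List.slice content (some (e.1 - (L : Int))) (some e.1) = w) := by
  split_ifs with hle hpat
  · rw [PySem.Set.contains_iff] at hpat
    rw [PySem.Set.mem_add]
    constructor
    · rintro (h | rfl)
      · exact Or.inl h
      · exact Or.inr ⟨hle, hpat, rfl⟩
    · rintro (h | ⟨_, _, rfl⟩)
      · exact Or.inl h
      · exact Or.inr rfl
  · rw [Bool.not_eq_true, ← Bool.not_eq_true, PySem.Set.contains_iff] at hpat
    tauto
  · tauto

-- characterisation of the scan's result as a membership predicate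
lemma pv_mem_scan (content : List Char) (lengths : List Nat) (patterns : PySem.Set (List Char)) (w : List Char) :
    w ∈ pvScanB content lengths patterns ↔
      ∃ e ∈ PySem.List.enumerate content 0, e.2 = '(' ∧
        ∃ L ∈ lengths, (L : Int) ≤ e.1 ∧
          PySem.List.slice content (some (e.1 - (L : Int))) (some e.1) ∈ patterns ∧
          PySem.List.slice content (some (e.1 - (L : Int))) (some e.1) = w := by
  unfold pvScanB
  rw [pv_mem_foldl w _
      (fun (e : Int × Char) => e.2 = '(' ∧ ∃ L ∈ lengths, (L : Int) ≤ e.1 ∧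
          PySem.List.slice content (some (e.1 - (L : Int))) (some e.1) ∈ patterns ∧
          PySem.List.slice content (some (e.1 - (L : Int))) (some e.1) = w)]
  · simp [PySem.Set.empty]
  · intro fs e
    by_cases hp : e.2 = '('
    · simp only [hp, beq_self_eq_true, if_true]
      rw [pv_mem_foldl w _
          (fun (L : Nat) => (L : Int) ≤ e.1 ∧
            PySem.List.slice content (some (e.1 - (L : Int))) (some e.1) ∈ patterns ∧
            PySem.List.slice content (some (e.1 - (L : Int))) (some e.1) = w)
          (fun fs' L => pv_inner_step content patterns e w fs' L)]
      tauto
    · have hb : (e.2 == '(') = false := by simp [hp]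
      simp [hb, hp]

-- an occurrence of w ++ "(" is exactly a '(' preceded by w
lemma pv_infix_paren_iff (w s : List Char) :
    (w ++ ['(']) <:+: s ↔
      ∃ k, ∃ h : k < s.length, s[k] = '(' ∧ w.length ≤ k ∧
        (s.drop (k - w.length)).take w.length = w := by
  constructor
  · rintro ⟨t, u, hs⟩
    have hs' : s = (t ++ w) ++ ('(' :: u) := by rw [← hs]; simp
    have hlt : t.length + w.length < s.length := by
      rw [hs']; simp only [List.length_append, List.length_cons]; omega
    have hdk : s.drop (t.length + w.length) = '(' :: u := by
      rw [hs', show t.length + w.length = (t ++ w).length by simp]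
      exact List.drop_left' rfl
    refine ⟨t.length + w.length, hlt, ?_, by omega, ?_⟩
    · have h2 := List.drop_eq_getElem_cons hlt
      have h3 := hdk.symm.trans h2
      injection h3 with h4 _
      exact h4.symm
    · have h1 : t.length + w.length - w.length = t.length := by omega
      rw [h1, hs', show (t ++ w) ++ ('(' :: u) = t ++ (w ++ ('(' :: u)) by simp,
          List.drop_left' rfl]
      exact List.take_left' rfl
  · rintro ⟨k, hk, hget, hlen, htake⟩
    refine ⟨s.take (k - w.length), s.drop (k + 1), ?_⟩
    have hdd : s.drop (k - w.length) = ((s.drop (k - w.length)).take w.length) ++ (s.drop (k - w.length)).drop w.length := by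
      simp
    have hdrop2 : (s.drop (k - w.length)).drop w.length = s.drop k := by
      rw [List.drop_drop]
      congr 1
      omega
    have hk' : s.drop k = '(' :: s.drop (k + 1) := by
      rw [List.drop_eq_getElem_cons hk, hget]
    have hmain : s = s.take (k - w.length) ++ (w ++ ['(']) ++ s.drop (k + 1) := by
      calc s = s.take (k - w.length) ++ s.drop (k - w.length) := by simp
        _ = s.take (k - w.length) ++ (w ++ ['(']) ++ s.drop (k + 1) := by
              rw [hdd, hdrop2, htake, hk']; simp
    exact hmain.symm

-- the slice B takes is the take-drop window
lemma pv_slice_eq (s : List Char) (k L : Nat) (hL : L ≤ k) :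
    PySem.List.slice s (some ((k : Int) - (L : Int))) (some (k : Int)) =
      (s.drop (k - L)).take L := by
  rw [PySem.List.slice_toNat _ (by omega) (by omega)]
  have h1 : ((k : Int) - (L : Int)).toNat = k - L := by omega
  have h2 : ((k : Int)).toNat = k := by omega
  rw [h1, h2]
  congr 1
  omega

-- ===== core per-function equivalence =====
lemma pv_test_eq (content : List Char) (functionProperties : List (String × Int))
    (p : String × Int) (hp : p ∈ functionProperties) :
    PySem.Chars.isIn (p.1.toList ++ ['(']) content =
      PySem.Set.contains
        (pvScanB content
          (PySem.List.sorted (PySem.Set.ofList (functionProperties.map (fun q => q.1.toList.length))) (fun x => x) false)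
          (PySem.Set.ofList (functionProperties.map (fun q => q.1.toList))))
        p.1.toList := by
  set w := p.1.toList with hw
  have hwpat : w ∈ PySem.Set.ofList (functionProperties.map (fun q => q.1.toList)) := by
    rw [PySem.Set.mem_ofList]
    exact List.mem_map.mpr ⟨p, hp, rfl⟩
  have hwlen : w.length ∈ PySem.List.sorted (PySem.Set.ofList (functionProperties.map (fun q => q.1.toList.length))) (fun x => x) false := by
    rw [PySem.List.mem_sorted, PySem.Set.mem_ofList]
    exact List.mem_map.mpr ⟨p, hp, rfl⟩
  rw [Bool.eq_iff_iff, PySem.Chars.isIn_iff_infix, PySem.Set.contains_iff, pv_mem_scan,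
      pv_infix_paren_iff]
  constructor
  · rintro ⟨k, hk, hget, hlen, htake⟩
    refine ⟨((k : Int), '('), ?_, rfl, w.length, hwlen, by omega, ?_⟩
    · rw [PySem.List.mem_enumerate_iff]
      exact ⟨k, hk, by simp [hget]⟩
    · rw [pv_slice_eq _ _ _ hlen, htake]
      exact ⟨hwpat, rfl⟩
  · rintro ⟨e, he, hpar, L, hL, hle, _, hslice⟩
    rw [PySem.List.mem_enumerate_iff] at he
    obtain ⟨k, hk, rfl⟩ := he
    simp only [zero_add] at hpar hle hslice ⊢
    have hLk : L ≤ k := by exact_mod_cast hle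
    rw [pv_slice_eq _ _ _ hLk] at hslice
    have hlenw : w.length = L := by
      have := congrArg List.length hslice
      simp only [List.length_take, List.length_drop] at this
      omega
    exact ⟨k, hk, hpar, by omega, by rw [hlenw]; exact hslice⟩

-- ===== VERDICT (by name: the statement is the Claim_ definition above) =====
theorem getFunctionCalls_spec : Claim_equal_getFunctionCalls := by
  intro name lines startLineCtr functionProperties _ _
  unfold Spec_getFunctionCalls getFunctionCalls getFunctionCalls_alt
  rw [pv_bodyA_eq_bodyB, List.nil_append, PySem.List.foldl_append_if]
  rw [List.nil_append]
  rw [List.filter_congr (fun p hp => pv_test_eq _ functionProperties p hp)]
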